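-- pv_equiv track=rewrite | github.com/SagarDhok/CodeDaily | GeeksOfGeeks/day-123.py | findMaxOddSum
-- ===== SOURCE A (Python) =====
-- def findMaxOddSum(arr):
--     total = 0
--     min_odd_pos = float('inf')
--     max_odd_neg = float('-inf')
--
--     for x in arr:
--         if x > 0:
--             total += x
--             if x % 2 != 0:
--                 min_odd_pos = min(min_odd_pos, x)
--         elif x % 2 != 0:
--             max_odd_neg = max(max_odd_neg, x)
--
--     if total % 2 != 0:
--         return total
--
--     option1 = total - min_odd_pos if min_odd_pos != float('inf') else float('-inf')
--     option2 = total + max_odd_neg if max_odd_neg != float('-inf') else float('-inf')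
--
--     result = max(option1, option2)
--     return result if result != float('-inf') else -1
-- ===== SOURCE B (Python) =====
-- def findMaxOddSum(arr):
--     # Parity dynamic programming: e = best even-parity subset sum (empty subset
--     # counts, so e >= 0), o = best odd-parity subset sum (None if impossible).
--     e = 0
--     o = None
--     for x in arr:
--         if x % 2 == 0:
--             if x > 0:
--                 e += x
--                 if o is not None:
--                     o += x
--         else:
--             new_e = e if o is None else max(e, o + x)
--             new_o = e + x if o is None else max(o, e + x)
--             e, o = new_e, new_o
--     return o if o is not None else -1
-- ===== Notes on version B (the rewrite author's own statement) =====
-- stated objective: alternative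
-- what changed: Replaces A's aggregate bookkeeping (sum of positives plus two tracked odd extrema combined at the end) with a parity dynamic program that carries the best even-parity and best odd-parity subset sums through a single fold and returns the odd one.
import Mathlib
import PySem

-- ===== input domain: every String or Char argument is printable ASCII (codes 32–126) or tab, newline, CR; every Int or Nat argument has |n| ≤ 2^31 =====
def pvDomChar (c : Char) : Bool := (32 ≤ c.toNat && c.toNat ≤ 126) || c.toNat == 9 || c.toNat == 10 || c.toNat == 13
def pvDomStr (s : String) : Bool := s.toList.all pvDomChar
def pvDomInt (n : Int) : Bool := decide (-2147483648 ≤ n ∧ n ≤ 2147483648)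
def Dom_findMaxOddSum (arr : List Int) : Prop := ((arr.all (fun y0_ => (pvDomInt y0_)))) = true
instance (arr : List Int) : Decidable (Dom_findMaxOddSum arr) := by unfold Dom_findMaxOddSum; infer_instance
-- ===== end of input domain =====

-- B replaces A's aggregates (positive sum + two odd extrema merged at the end) by a
-- parity dynamic program (best even / best odd subset sum); return values proved equal.

-- ===== PORT A =====
-- A's float('inf') / float('-inf') sentinels become Option Int (none = sentinel still in place).
def stepA (s : Int × Option Int × Option Int) (x : Int) : Int × Option Int × Option Int :=
  let (t, mo, mn) := s
  if x > 0 then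
    (t + x,
     if x % 2 ≠ 0 then
       some (match mo with | none => x | some m => min m x)
     else mo,
     mn)
  else if x % 2 ≠ 0 then
    (t, mo, some (match mn with | none => x | some m => max m x))
  else (t, mo, mn)

def findMaxOddSum (arr : List Int) : Int :=
  let s := arr.foldl stepA (0, none, none)
  let total := s.1
  let mo := s.2.1
  let mn := s.2.2
  if total % 2 ≠ 0 then total
  else
    match mo, mn with
    | none,   none   => -1
    | some a, none   => total - a
    | none,   some b => total + b
    | some a, some b => max (total - a) (total + b)

-- ===== PORT B =====
-- DP state: (e, o) = (best even-parity subset sum, best odd-parity subset sum or none).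
def stepB (s : Int × Option Int) (x : Int) : Int × Option Int :=
  let (e, o) := s
  if x % 2 = 0 then
    if x > 0 then (e + x, o.map (· + x)) else (e, o)
  else
    ((match o with | none => e | some ov => max e (ov + x)),
     some (match o with | none => e + x | some ov => max ov (e + x)))

def findMaxOddSum_alt (arr : List Int) : Int :=
  match (arr.foldl stepB (0, none)).2 with
  | none => -1
  | some v => v

-- ===== PRECONDITION & SPEC =====
def Spec_findMaxOddSum (arr : List Int) (out : Int) : Prop := out = findMaxOddSum_alt arr
instance (arr : List Int) (out : Int) : Decidable (Spec_findMaxOddSum arr out) := by unfold Spec_findMaxOddSum; infer_instance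

-- ===== CLAIM (what is proved, stated in full; the proofs are below) =====
def Claim_equal_findMaxOddSum : Prop := ∀ (arr : List Int), Dom_findMaxOddSum arr → Spec_findMaxOddSum arr (findMaxOddSum arr)

-- ===== LEMMAS AND PROOFS =====

-- running minimum over an Option accumulator
def minO (o : Option Int) (x : Int) : Option Int :=
  some (match o with | none => x | some m => min m x)

def maxO (o : Option Int) (x : Int) : Option Int :=
  some (match o with | none => x | some m => max m x)

-- merge A's two extrema into "minimum absolute odd value so far"
def mergeAbs (mo mn : Option Int) : Option Int :=
  match mo, mn with
  | none,   none   => none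
  | some a, none   => some a
  | none,   some b => some (-b)
  | some a, some b => some (min a (-b))

theorem mergeAbs_pos (mo mn : Option Int) (x : Int) :
    mergeAbs (minO mo x) mn = minO (mergeAbs mo mn) x := by
  cases mo <;> cases mn <;> simp [mergeAbs, minO] <;> omega

theorem mergeAbs_neg (mo mn : Option Int) (x : Int) :
    mergeAbs mo (maxO mn x) = minO (mergeAbs mo mn) (-x) := by
  cases mo <;> cases mn <;> simp only [mergeAbs, minO, maxO, Option.some.injEq] <;> omega

-- abstract "sum of positives / min abs odd" state and its update
def updPM (s : Int × Option Int) (x : Int) : Int × Option Int :=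
  ((if x > 0 then s.1 + x else s.1),
   if x % 2 ≠ 0 then minO s.2 |x| else s.2)

-- A's fold state, projected through mergeAbs, is the (P, M) fold
theorem loop_rel (l : List Int) (t : Int) (mo mn : Option Int) :
    ((l.foldl stepA (t, mo, mn)).1,
      mergeAbs (l.foldl stepA (t, mo, mn)).2.1 (l.foldl stepA (t, mo, mn)).2.2)
    = l.foldl updPM (t, mergeAbs mo mn) := by
  induction l generalizing t mo mn with
  | nil => simp
  | cons x xs ih =>
    rw [List.foldl_cons, List.foldl_cons]
    by_cases hpos : x > 0
    · by_cases hodd : x % 2 ≠ 0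
      · have hA : stepA (t, mo, mn) x = (t + x, minO mo x, mn) := by
          simp [stepA, minO, hpos, hodd]
        have hP : updPM (t, mergeAbs mo mn) x = (t + x, minO (mergeAbs mo mn) x) := by
          simp [updPM, hpos, hodd, abs_of_pos hpos]
        rw [hA, hP, ih, mergeAbs_pos]
      · have hA : stepA (t, mo, mn) x = (t + x, mo, mn) := by simp [stepA, hpos, hodd]
        have hP : updPM (t, mergeAbs mo mn) x = (t + x, mergeAbs mo mn) := by
          simp [updPM, hpos, hodd]
        rw [hA, hP, ih]
    · by_cases hodd : x % 2 ≠ 0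
      · have hneg : x < 0 := by
          rcases lt_or_eq_of_le (not_lt.mp hpos) with h | h
          · exact h
          · exact absurd (by omega : x % 2 = 0) hodd
        have hA : stepA (t, mo, mn) x = (t, mo, maxO mn x) := by
          simp [stepA, maxO, hpos, hodd]
        have hP : updPM (t, mergeAbs mo mn) x = (t, minO (mergeAbs mo mn) (-x)) := by
          simp [updPM, hpos, hodd, abs_of_neg hneg]
        rw [hA, hP, ih, mergeAbs_neg]
      · have hA : stepA (t, mo, mn) x = (t, mo, mn) := by simp [stepA, hpos, hodd]
        have hP : updPM (t, mergeAbs mo mn) x = (t, mergeAbs mo mn) := by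
          simp [updPM, hpos, hodd]
        rw [hA, hP, ih]

-- the DP state B maintains, as a function of (P, M)
def absEO (s : Int × Option Int) : Int × Option Int :=
  match s.2 with
  | none => (s.1, none)
  | some m => if s.1 % 2 = 0 then (s.1, some (s.1 - m)) else (s.1 - m, some s.1)

-- side invariant of the (P, M) state
def InvPM (s : Int × Option Int) : Prop :=
  (s.2 = none → s.1 % 2 = 0) ∧ (∀ m, s.2 = some m → 1 ≤ m)

theorem invPM_upd (s : Int × Option Int) (x : Int) (h : InvPM s) :
    InvPM (updPM s x) := by
  obtain ⟨P, M⟩ := s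
  obtain ⟨h1, h2⟩ := h
  by_cases hodd : x % 2 = 0
  · cases M with
    | none =>
      have hPe := h1 rfl
      constructor
      · intro _; simp only [updPM]; split_ifs <;> omega
      · intro m hm; simp only [updPM, if_neg (by omega : ¬ x % 2 ≠ 0)] at hm
        exact h2 m hm
    | some m =>
      have hm := h2 m rfl
      constructor
      · intro hn; simp only [updPM, if_neg (by omega : ¬ x % 2 ≠ 0)] at hn; exact absurd hn (by simp)
      · intro m' hm'; simp only [updPM, if_neg (by omega : ¬ x % 2 ≠ 0)] at hm'
        simp only [Option.some.injEq] at hm'; omega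
  · have hax : 1 ≤ |x| := Int.one_le_abs (by omega)
    cases M with
    | none =>
      constructor
      · intro hn; simp only [updPM, if_pos (by omega : x % 2 ≠ 0), minO] at hn; exact absurd hn (by simp)
      · intro m' hm'; simp only [updPM, if_pos (by omega : x % 2 ≠ 0), minO, Option.some.injEq] at hm'
        omega
    | some m =>
      have hm := h2 m rfl
      constructor
      · intro hn; simp only [updPM, if_pos (by omega : x % 2 ≠ 0), minO] at hn; exact absurd hn (by simp)
      · intro m' hm'; simp only [updPM, if_pos (by omega : x % 2 ≠ 0), minO, Option.some.injEq] at hm'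
        omega

theorem stepBE_eq (s : Int × Option Int) (x : Int) (h : InvPM s) :
    stepB (absEO s) x = absEO (updPM s x) := by
  obtain ⟨P, M⟩ := s
  obtain ⟨h1, h2⟩ := h
  rcases M with _ | m
  · have hPe : P % 2 = 0 := h1 rfl
    simp only [stepB, absEO, updPM, minO]
    split_ifs <;>
      (try simp only [stepB, absEO, updPM, minO, Option.map_none, Prod.mk.injEq,
        Option.some.injEq, true_and, and_true]) <;>
      (try split_ifs) <;>
      (try simp only [Prod.mk.injEq, Option.some.injEq, true_and, and_true]) <;>
      (try rw [abs_of_pos (show (0:Int) < x by omega)]) <;>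
      (try rw [abs_of_nonpos (show x ≤ 0 by omega)]) <;>
      (try split_ifs) <;>
      first | rfl | omega | (exfalso; omega)
  · have hm := h2 m rfl
    simp only [stepB, absEO, updPM, minO]
    split_ifs <;>
      (try simp only [stepB, absEO, updPM, minO, Option.map_some, Prod.mk.injEq,
        Option.some.injEq, true_and, and_true]) <;>
      (try split_ifs) <;>
      (try simp only [Prod.mk.injEq, Option.some.injEq, true_and, and_true]) <;>
      (try rw [abs_of_pos (show (0:Int) < x by omega)]) <;>
      (try rw [abs_of_nonpos (show x ≤ 0 by omega)]) <;>
      (try split_ifs) <;>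
      first | rfl | omega | (exfalso; omega)

theorem foldBE (l : List Int) (s : Int × Option Int) (h : InvPM s) :
    l.foldl stepB (absEO s) = absEO (l.foldl updPM s) ∧ InvPM (l.foldl updPM s) := by
  induction l generalizing s with
  | nil => exact ⟨rfl, h⟩
  | cons x xs ih =>
    rw [List.foldl_cons, List.foldl_cons, stepBE_eq s x h]
    exact ih _ (invPM_upd s x h)

-- ===== VERDICT (by name: the statement is the Claim_ definition above) =====
theorem findMaxOddSum_spec : Claim_equal_findMaxOddSum := by
  unfold Claim_equal_findMaxOddSum
  intro arr _
  unfold Spec_findMaxOddSum findMaxOddSum findMaxOddSum_alt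
  dsimp only
  have hinv0 : InvPM (0, none) := ⟨fun _ => rfl, fun m hm => by simp at hm⟩
  obtain ⟨hB, hI⟩ := foldBE arr (0, none) hinv0
  have h0 : absEO (0, (none : Option Int)) = (0, none) := rfl
  rw [h0] at hB
  have hlr : ((arr.foldl stepA (0, none, none)).1,
      mergeAbs (arr.foldl stepA (0, none, none)).2.1 (arr.foldl stepA (0, none, none)).2.2)
      = arr.foldl updPM (0, none) := loop_rel arr 0 none none
  rw [hB, ← hlr]
  set sA := arr.foldl stepA (0, none, none) with hsA
  obtain ⟨hI1, hI2⟩ := hI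
  rw [← hlr] at hI1 hI2
  by_cases hpar : sA.1 % 2 = 0
  · simp only [hpar, if_neg (by omega : ¬ (0:Int) ≠ 0)]
    rcases hmo : sA.2.1 with _ | a <;> rcases hmn : sA.2.2 with _ | b
    · simp [absEO, mergeAbs]
    · have hb := hI2 (-b) (by simp [mergeAbs, hmo, hmn])
      simp [absEO, mergeAbs, hpar]
    · have ha := hI2 a (by simp [mergeAbs, hmo, hmn])
      simp [absEO, mergeAbs, hpar]
    · have hmin := hI2 (min a (-b)) (by simp [mergeAbs, hmo, hmn])
      simp [absEO, mergeAbs, hpar]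
      omega
  · simp only [if_pos (by omega : sA.1 % 2 ≠ 0)]
    rcases hM : mergeAbs sA.2.1 sA.2.2 with _ | m
    · exact absurd (hI1 hM) hpar
    · simp [absEO, hpar]
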